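-- pv_equiv track=rewrite | github.com/lmiksch/cocopaths | copaths/path_to_seq.py | pseudoknot_attack_detection
-- ===== SOURCE A (Python) =====
-- def pseudoknot_attack_detection(pairtable):
--
--
--         for x in range(1,len(pairtable)-1):
--             secured_domains = []
--
--             for i,j in enumerate(pairtable[x][1:],start=1):
--                 if j > i+1:
--                     secured_domains.append((i +1,j))
--
--
--
--             for tuple in secured_domains:
--                 if pairtable[x][tuple[0]:tuple[1]] != pairtable[x+1][tuple[0]:tuple[1]]:
--                     return True
--
--         return False
-- ===== SOURCE B (Python) =====
-- def pseudoknot_attack_detection(pairtable):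
--     # Per consecutive row pair: skip identical rows outright, otherwise mark
--     # differing positions once with running prefix counts and answer each
--     # secured-domain range query by a subtraction instead of re-slicing sublists.
--     for r, s in zip(pairtable[1:], pairtable[2:]):
--         if r == s:
--             continue
--         m = max(len(r), len(s))
--         pref = [0]
--         acc = 0
--         for k in range(m):
--             d = ((k < len(r)) != (k < len(s))) or (
--                 k < len(r) and k < len(s) and r[k] != s[k])
--             acc += 1 if d else 0
--             pref.append(acc)
--         for i in range(1, len(r)):
--             j = r[i]
--             if j > i + 1 and pref[min(j, m)] - pref[i + 1] > 0:
--                 return True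
--     return False
-- ===== Notes on version B (the rewrite author's own statement) =====
-- stated objective: alternative
-- what changed: Instead of re-slicing and comparing whole sublists of the two rows for every secured domain, B skips identical consecutive rows and otherwise computes one prefix-count array of differing positions per row pair, answering each secured-domain range query in O(1).
import Mathlib
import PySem

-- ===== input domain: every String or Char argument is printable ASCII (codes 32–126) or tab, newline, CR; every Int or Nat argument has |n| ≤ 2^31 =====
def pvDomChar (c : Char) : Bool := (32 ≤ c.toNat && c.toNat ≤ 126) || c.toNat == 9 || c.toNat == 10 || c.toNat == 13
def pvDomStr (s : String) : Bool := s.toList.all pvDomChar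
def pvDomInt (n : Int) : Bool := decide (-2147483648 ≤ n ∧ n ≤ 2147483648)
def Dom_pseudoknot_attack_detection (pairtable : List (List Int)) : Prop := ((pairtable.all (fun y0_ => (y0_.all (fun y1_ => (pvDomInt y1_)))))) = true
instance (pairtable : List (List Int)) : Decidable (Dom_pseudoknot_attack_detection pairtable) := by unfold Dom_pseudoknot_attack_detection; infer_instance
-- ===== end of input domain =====

-- B replaces A's per-domain slice comparisons: it skips identical consecutive rows and
-- otherwise marks differing positions once per row pair (prefix counts), answering each
-- secured-domain range query by a subtraction.

-- ===== PORT A =====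
def pseudoknot_attack_detection (pairtable : List (List Int)) : Bool :=
  (PySem.List.pyRange 1 ((pairtable.length : Int) - 1) 1).any (fun x =>
    let row := PySem.List.pyGetD pairtable x []
    let secured_domains : List (Int × Int) :=
      (PySem.List.enumerate (PySem.List.slice row (some 1) none) 1).foldl
        (fun acc ij => if ij.2 > ij.1 + 1 then acc ++ [(ij.1 + 1, ij.2)] else acc) []
    secured_domains.any (fun t =>
      PySem.List.slice row (some t.1) (some t.2)
        != PySem.List.slice (PySem.List.pyGetD pairtable (x + 1) []) (some t.1) (some t.2)))

-- ===== PORT B =====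
-- helper for B: 'd = (k < len(r)) != (k < len(s)) or (k < len(r) and k < len(s) and r[k] != s[k])'
def pvDiffAt (r s : List Int) (k : Int) : Bool :=
  (decide (k < (r.length : Int)) != decide (k < (s.length : Int))) ||
  (decide (k < (r.length : Int)) && decide (k < (s.length : Int)) &&
    (PySem.List.pyGetD r k 0 != PySem.List.pyGetD s k 0))

def pseudoknot_attack_detection_alt (pairtable : List (List Int)) : Bool :=
  ((PySem.List.slice pairtable (some 1) none).zip (PySem.List.slice pairtable (some 2) none)).any
    (fun rs =>
      if rs.1 == rs.2 then false else
      let r := rs.1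
      let s := rs.2
      let m : Int := max (r.length : Int) (s.length : Int)
      let pa := (PySem.List.pyRange 0 m 1).foldl
        (fun (st : List Int × Int) k =>
          let acc := st.2 + (if pvDiffAt r s k then 1 else 0)
          (st.1 ++ [acc], acc)) ([0], 0)
      let pref := pa.1
      (PySem.List.pyRange 1 (r.length : Int) 1).any (fun i =>
        let j := PySem.List.pyGetD r i 0
        decide (j > i + 1) &&
          decide (PySem.List.pyGetD pref (min j m) 0 - PySem.List.pyGetD pref (i + 1) 0 > 0)))

-- ===== PRECONDITION & SPEC =====
def Spec_pseudoknot_attack_detection (pairtable : List (List Int)) (out : Bool) : Prop := out = pseudoknot_attack_detection_alt pairtable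
instance (pairtable : List (List Int)) (out : Bool) : Decidable (Spec_pseudoknot_attack_detection pairtable out) := by unfold Spec_pseudoknot_attack_detection; infer_instance

-- ===== CLAIM (what is proved, stated in full; the proofs are below) =====
def Claim_equal_pseudoknot_attack_detection : Prop := ∀ (pairtable : List (List Int)), Dom_pseudoknot_attack_detection pairtable → Spec_pseudoknot_attack_detection pairtable (pseudoknot_attack_detection pairtable)

-- ===== LEMMAS AND PROOFS =====

-- number of differing positions among indices < t
lemma pvDiffAt_eq (r s : List Int) (k : Nat) :
    pvDiffAt r s (k : Int) = decide (r[k]? ≠ s[k]?) := by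
  unfold pvDiffAt
  by_cases hr : k < r.length <;> by_cases hs : k < s.length <;>
    simp [hr, hs, PySem.List.pyGetD_natCast, List.getD_eq_getElem?_getD] <;>
  · cases h : decide (r[k] = s[k]) <;> simp_all [bne]

lemma pvDiffAt_false_of_ge (r s : List Int) (k : Nat)
    (hr : r.length ≤ k) (hs : s.length ≤ k) : pvDiffAt r s (k : Int) = false := by
  rw [pvDiffAt_eq]
  simp [List.getElem?_eq_none hr, List.getElem?_eq_none hs]

def pvCnt (r s : List Int) (t : Nat) : Nat :=
  (List.range t).countP (fun k : Nat => pvDiffAt r s (k : Int))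

lemma pvCnt_split (r s : List Int) (a b : Nat) (hab : a ≤ b) :
    pvCnt r s b = pvCnt r s a
      + ((List.range (b - a)).map (a + ·)).countP (fun k : Nat => pvDiffAt r s (k : Int)) := by
  have h : b = a + (b - a) := by omega
  rw [h]
  unfold pvCnt
  rw [List.range_add, List.countP_append, Nat.add_sub_cancel_left]

lemma pvCnt_lt_iff (r s : List Int) (a b : Nat) :
    pvCnt r s a < pvCnt r s b ↔ ∃ d : Nat, a ≤ d ∧ d < b ∧ pvDiffAt r s (d : Int) = true := by
  by_cases hab : a ≤ b
  · rw [pvCnt_split r s a b hab]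
    constructor
    · intro h
      have : 0 < ((List.range (b - a)).map (a + ·)).countP (fun k : Nat => pvDiffAt r s (k : Int)) := by omega
      obtain ⟨x, hx, hpx⟩ := List.countP_pos_iff.mp this
      obtain ⟨y, hy, rfl⟩ := List.mem_map.mp hx
      exact ⟨a + y, by omega, by have := List.mem_range.mp hy; omega, hpx⟩
    · rintro ⟨d, had, hdb, hd⟩
      have : 0 < ((List.range (b - a)).map (a + ·)).countP (fun k : Nat => pvDiffAt r s (k : Int)) :=
        List.countP_pos_iff.mpr ⟨d, List.mem_map.mpr ⟨d - a, List.mem_range.mpr (by omega), by omega⟩, hd⟩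
      omega
  · constructor
    · intro h
      have : pvCnt r s b ≤ pvCnt r s a := by
        unfold pvCnt
        exact List.Sublist.countP_le (List.range_sublist.mpr (by omega))
      omega
    · rintro ⟨d, had, hdb, _⟩; omega

lemma pvSlice_ne_iff (r s : List Int) (a : Nat) (b : Int) (hb : 0 ≤ b) :
    (PySem.List.slice r (some (a : Int)) (some b) ≠ PySem.List.slice s (some (a : Int)) (some b))
      ↔ ∃ d : Nat, a ≤ d ∧ (d : Int) < b ∧ pvDiffAt r s (d : Int) = true := by
  rw [PySem.List.slice_toNat r (by positivity) hb, PySem.List.slice_toNat s (by positivity) hb]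
  rw [Int.toNat_natCast]
  rw [ne_eq, List.ext_getElem?_iff]
  push_neg
  constructor
  · rintro ⟨i, hi⟩
    rw [List.getElem?_take, List.getElem?_take, List.getElem?_drop, List.getElem?_drop] at hi
    by_cases hin : i < b.toNat - a
    · refine ⟨a + i, by omega, by omega, ?_⟩
      rw [pvDiffAt_eq]
      simp only [hin, if_pos] at hi
      exact decide_eq_true hi
    · simp [hin] at hi
  · rintro ⟨d, had, hdb, hd⟩
    refine ⟨d - a, ?_⟩
    rw [List.getElem?_take, List.getElem?_take, List.getElem?_drop, List.getElem?_drop]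
    have hin : d - a < b.toNat - a := by omega
    rw [pvDiffAt_eq] at hd
    have := of_decide_eq_true hd
    simpa [hin, show a + (d - a) = d by omega] using this

lemma pvCnt_succ (r s : List Int) (n : Nat) :
    pvCnt r s (n + 1) = pvCnt r s n + (if pvDiffAt r s (n : Int) then 1 else 0) := by
  unfold pvCnt
  rw [List.range_succ, List.countP_append]
  simp [List.countP_cons]

lemma pvPref_fold (r s : List Int) (n : Nat) :
    ((PySem.List.pyRange 0 (n : Int) 1).foldl
        (fun (st : List Int × Int) k =>
          let acc := st.2 + (if pvDiffAt r s k then 1 else 0)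
          (st.1 ++ [acc], acc)) ([0], 0))
      = ((List.range (n + 1)).map (fun t => (pvCnt r s t : Int)), (pvCnt r s n : Int)) := by
  induction n with
  | zero =>
    rw [PySem.List.pyRange_one_eq_nil (by omega)]
    simp [pvCnt]
  | succ n ih =>
    have hc : ((n + 1 : Nat) : Int) = (n : Int) + 1 := by push_cast; ring
    rw [hc, PySem.List.pyRange_one_succ_right (by positivity), List.foldl_append, ih]
    simp only [List.foldl_cons, List.foldl_nil]
    have hs : (pvCnt r s n : Int) + (if pvDiffAt r s (n : Int) then 1 else 0)
        = (pvCnt r s (n + 1) : Int) := by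
      rw [pvCnt_succ]
      split_ifs <;> push_cast <;> ring
    rw [hs, List.range_succ (n := n + 1), List.map_append]
    rfl

-- "some secured domain of r differs against s": the common meaning of both row tests
def pvRowHit (r s : List Int) : Prop :=
  ∃ k : Nat, ∃ _ : k + 1 < r.length, r[k+1] > (k : Int) + 2 ∧
    ∃ d : Nat, k + 2 ≤ d ∧ (d : Int) < r[k+1] ∧ pvDiffAt r s (d : Int) = true

lemma pvA_row_iff (r s : List Int) :
    ((((PySem.List.enumerate (PySem.List.slice r (some 1) none) 1).foldl
        (fun acc ij => if ij.2 > ij.1 + 1 then acc ++ [(ij.1 + 1, ij.2)] else acc) []).any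
      (fun t => PySem.List.slice r (some t.1) (some t.2)
          != PySem.List.slice s (some t.1) (some t.2))) = true) ↔ pvRowHit r s := by
  rw [PySem.List.foldl_append_ite (p := fun ij : Int × Int => ij.2 > ij.1 + 1)
        (f := fun ij : Int × Int => (ij.1 + 1, ij.2))]
  rw [List.nil_append, List.any_map, List.any_filter, PySem.List.slice_from_one,
    List.any_eq_true]
  constructor
  · rintro ⟨ij, hmem, hP⟩
    obtain ⟨k, hk, rfl⟩ := (PySem.List.mem_enumerate_iff _ _ _).mp hmem
    simp only [Function.comp, Bool.and_eq_true, decide_eq_true_eq, bne_iff_ne] at hP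
    obtain ⟨h1, h2⟩ := hP
    rw [List.getElem_tail] at h1 h2
    have hk' : k + 1 < r.length := by have := List.length_tail (l := r); omega
    have hcast : (1 : Int) + (k : Int) + 1 = ((k + 2 : Nat) : Int) := by push_cast; ring
    rw [hcast] at h2
    rw [pvSlice_ne_iff r s (k + 2) _ (by omega)] at h2
    obtain ⟨d, hd1, hd2, hd3⟩ := h2
    exact ⟨k, hk', by omega, d, hd1, hd2, hd3⟩
  · rintro ⟨k, hk, h1, d, hd1, hd2, hd3⟩
    have hk2 : k < r.tail.length := by have := List.length_tail (l := r); omega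
    refine ⟨(1 + (k : Int), r.tail[k]), (PySem.List.mem_enumerate_iff _ _ _).mpr ⟨k, hk2, rfl⟩, ?_⟩
    simp only [Function.comp, Bool.and_eq_true, decide_eq_true_eq, bne_iff_ne]
    rw [List.getElem_tail]
    have hcast : (1 : Int) + (k : Int) + 1 = ((k + 2 : Nat) : Int) := by push_cast; ring
    rw [hcast, pvSlice_ne_iff r s (k + 2) _ (by omega)]
    exact ⟨by omega, d, hd1, hd2, hd3⟩

lemma pvPref_get (r s : List Int) (M : Nat) (t : Int) (h0 : 0 ≤ t) (h1 : t ≤ (M : Int)) :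
    PySem.List.pyGetD ((List.range (M + 1)).map (fun u => (pvCnt r s u : Int))) t 0
      = (pvCnt r s t.toNat : Int) := by
  rw [PySem.List.pyGetD_of_nonneg _ _ h0, List.getD_eq_getElem?_getD, List.getElem?_map,
    List.getElem?_range (by omega)]
  rfl

lemma pvDiff_lt_max (r s : List Int) (d : Nat) (hd : pvDiffAt r s (d : Int) = true) :
    d < max r.length s.length := by
  by_contra h
  rw [pvDiffAt_false_of_ge r s d (by omega) (by omega)] at hd
  exact Bool.false_ne_true hd

lemma pvB_row_iff (r s : List Int) :
    ((PySem.List.pyRange 1 (r.length : Int) 1).any (fun i =>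
        decide (PySem.List.pyGetD r i 0 > i + 1) &&
          decide (PySem.List.pyGetD
              (((PySem.List.pyRange 0 (max (r.length : Int) (s.length : Int)) 1).foldl
                (fun (st : List Int × Int) k =>
                  let acc := st.2 + (if pvDiffAt r s k then 1 else 0)
                  (st.1 ++ [acc], acc)) ([0], 0)).1)
              (min (PySem.List.pyGetD r i 0) (max (r.length : Int) (s.length : Int))) 0
            - PySem.List.pyGetD
              (((PySem.List.pyRange 0 (max (r.length : Int) (s.length : Int)) 1).foldl
                (fun (st : List Int × Int) k =>
                  let acc := st.2 + (if pvDiffAt r s k then 1 else 0)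
                  (st.1 ++ [acc], acc)) ([0], 0)).1)
              (i + 1) 0 > 0)) = true) ↔ pvRowHit r s := by
  rw [show max (r.length : Int) (s.length : Int) = ((max r.length s.length : Nat) : Int) from
    (Nat.cast_max _ _).symm]
  rw [pvPref_fold r s (max r.length s.length)]
  set M := max r.length s.length with hM
  rw [List.any_eq_true]
  constructor
  · rintro ⟨i, hmem, hP⟩
    obtain ⟨hi1, hi2⟩ := PySem.List.mem_pyRange_one.mp hmem
    set k : Nat := i.toNat - 1 with hk
    have hik : i = ((k + 1 : Nat) : Int) := by omega
    have hkr : k + 1 < r.length := by omega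
    have hgr : PySem.List.pyGetD r i 0 = r[k+1] := by
      rw [PySem.List.pyGetD_of_nonneg _ _ (by omega), show i.toNat = k + 1 by omega,
        List.getD_eq_getElem r 0 hkr]
    simp only [Bool.and_eq_true, decide_eq_true_eq] at hP
    obtain ⟨h1, h2⟩ := hP
    rw [hgr] at h1 h2
    have h1' : r[k+1] > (k : Int) + 2 := by rw [hik] at h1; push_cast at h1; omega
    have hkM : k + 2 ≤ M := by omega
    have hmin0 : 0 ≤ min r[k+1] ((M : Nat) : Int) := by
      have : (0:Int) ≤ (M : Int) := by positivity
      omega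
    have hminM : min r[k+1] ((M : Nat) : Int) ≤ (M : Int) := min_le_right _ _
    rw [pvPref_get r s M _ hmin0 hminM] at h2
    have hi1' : i + 1 = ((k + 2 : Nat) : Int) := by omega
    rw [hi1', pvPref_get r s M _ (by positivity) (by omega), Int.toNat_natCast] at h2
    have hlt : pvCnt r s (k + 2) < pvCnt r s (min r[k+1] ((M : Nat) : Int)).toNat := by omega
    obtain ⟨d, hd1, hd2, hd3⟩ := (pvCnt_lt_iff r s _ _).mp hlt
    refine ⟨k, hkr, h1', d, hd1, ?_, hd3⟩
    have : ((min r[k+1] ((M : Nat) : Int)).toNat : Int) ≤ r[k+1] := by omega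
    omega
  · rintro ⟨k, hk, h1, d, hd1, hd2, hd3⟩
    have hdM : d < M := pvDiff_lt_max r s d hd3
    refine ⟨((k + 1 : Nat) : Int), PySem.List.mem_pyRange_one.mpr ⟨by push_cast; omega, by
      push_cast; omega⟩, ?_⟩
    have hgr : PySem.List.pyGetD r ((k + 1 : Nat) : Int) 0 = r[k+1] := by
      rw [PySem.List.pyGetD_of_nonneg _ _ (by positivity), Int.toNat_natCast,
        List.getD_eq_getElem r 0 hk]
    simp only [Bool.and_eq_true, decide_eq_true_eq]
    rw [hgr]
    have h1c : r[k+1] > ((k + 1 : Nat) : Int) + 1 := by push_cast; push_cast at h1; omega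
    refine ⟨h1c, ?_⟩
    have hmin0 : 0 ≤ min r[k+1] ((M : Nat) : Int) := by
      have : (0:Int) ≤ (M : Int) := by positivity
      omega
    rw [pvPref_get r s M _ hmin0 (min_le_right _ _)]
    rw [show ((k + 1 : Nat) : Int) + 1 = ((k + 2 : Nat) : Int) by push_cast; ring]
    rw [pvPref_get r s M _ (by positivity) (by push_cast; omega), Int.toNat_natCast]
    have hlt : pvCnt r s (k + 2) < pvCnt r s (min r[k+1] ((M : Nat) : Int)).toNat := by
      apply (pvCnt_lt_iff r s _ _).mpr
      exact ⟨d, hd1, by omega, hd3⟩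
    omega

lemma pvA_iff (l : List (List Int)) :
    pseudoknot_attack_detection l = true ↔
      ∃ t : Nat, ∃ _ : t + 2 < l.length, pvRowHit l[t+1] l[t+2] := by
  unfold pseudoknot_attack_detection
  rw [List.any_eq_true]
  constructor
  · rintro ⟨x, hmem, hP⟩
    obtain ⟨hx1, hx2⟩ := PySem.List.mem_pyRange_one.mp hmem
    obtain ⟨t, rfl⟩ : ∃ t : Nat, x = ((t + 1 : Nat) : Int) := ⟨x.toNat - 1, by omega⟩
    have hlen : t + 2 < l.length := by omega
    have hr1 : PySem.List.pyGetD l ((t + 1 : Nat) : Int) [] = l[t+1] := by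
      rw [PySem.List.pyGetD_of_nonneg _ _ (by positivity), Int.toNat_natCast,
        List.getD_eq_getElem l [] (by omega)]
    have hr2 : PySem.List.pyGetD l (((t + 1 : Nat) : Int) + 1) [] = l[t+2] := by
      rw [PySem.List.pyGetD_of_nonneg _ _ (by positivity), show (((t + 1 : Nat) : Int) + 1).toNat = t + 2 by omega,
        List.getD_eq_getElem l [] (by omega)]
    have hP' : ((((PySem.List.enumerate
          (PySem.List.slice (PySem.List.pyGetD l ((t + 1 : Nat) : Int) []) (some 1) none) 1).foldl
        (fun acc ij => if ij.2 > ij.1 + 1 then acc ++ [(ij.1 + 1, ij.2)] else acc) []).any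
      (fun tu => PySem.List.slice (PySem.List.pyGetD l ((t + 1 : Nat) : Int) []) (some tu.1) (some tu.2)
          != PySem.List.slice (PySem.List.pyGetD l (((t + 1 : Nat) : Int) + 1) []) (some tu.1) (some tu.2)))
        = true) := hP
    rw [hr1, hr2] at hP'
    exact ⟨t, hlen, (pvA_row_iff _ _).mp hP'⟩
  · rintro ⟨t, hlen, hhit⟩
    refine ⟨((t + 1 : Nat) : Int), PySem.List.mem_pyRange_one.mpr
      ⟨by push_cast; omega, by push_cast; omega⟩, ?_⟩
    have hr1 : PySem.List.pyGetD l ((t + 1 : Nat) : Int) [] = l[t+1] := by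
      rw [PySem.List.pyGetD_of_nonneg _ _ (by positivity), Int.toNat_natCast,
        List.getD_eq_getElem l [] (by omega)]
    have hr2 : PySem.List.pyGetD l (((t + 1 : Nat) : Int) + 1) [] = l[t+2] := by
      rw [PySem.List.pyGetD_of_nonneg _ _ (by positivity), show (((t + 1 : Nat) : Int) + 1).toNat = t + 2 by omega,
        List.getD_eq_getElem l [] (by omega)]
    show ((((PySem.List.enumerate
          (PySem.List.slice (PySem.List.pyGetD l ((t + 1 : Nat) : Int) []) (some 1) none) 1).foldl
        (fun acc ij => if ij.2 > ij.1 + 1 then acc ++ [(ij.1 + 1, ij.2)] else acc) []).any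
      (fun tu => PySem.List.slice (PySem.List.pyGetD l ((t + 1 : Nat) : Int) []) (some tu.1) (some tu.2)
          != PySem.List.slice (PySem.List.pyGetD l (((t + 1 : Nat) : Int) + 1) []) (some tu.1) (some tu.2)))
        = true)
    rw [hr1, hr2]
    exact (pvA_row_iff _ _).mpr hhit

lemma pvRowHit_self_false (s : List Int) : ¬ pvRowHit s s := by
  rintro ⟨k, hk, -, d, -, -, hd3⟩
  unfold pvDiffAt at hd3
  simp at hd3

lemma pvB_inner_shape (r s : List Int) :
    ((if r == s then false else (PySem.List.pyRange 1 (r.length : Int) 1).any (fun i =>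
        decide (PySem.List.pyGetD r i 0 > i + 1) &&
          decide (PySem.List.pyGetD
              (((PySem.List.pyRange 0 (max (r.length : Int) (s.length : Int)) 1).foldl
                (fun (st : List Int × Int) k =>
                  let acc := st.2 + (if pvDiffAt r s k then 1 else 0)
                  (st.1 ++ [acc], acc)) ([0], 0)).1)
              (min (PySem.List.pyGetD r i 0) (max (r.length : Int) (s.length : Int))) 0
            - PySem.List.pyGetD
              (((PySem.List.pyRange 0 (max (r.length : Int) (s.length : Int)) 1).foldl
                (fun (st : List Int × Int) k =>
                  let acc := st.2 + (if pvDiffAt r s k then 1 else 0)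
                  (st.1 ++ [acc], acc)) ([0], 0)).1)
              (i + 1) 0 > 0))) = true) ↔ pvRowHit r s := by
  by_cases h : r = s
  · subst h
    simp only [BEq.rfl, if_true]
    exact iff_of_false (Bool.false_ne_true) (pvRowHit_self_false r)
  · rw [if_neg (by simpa using h)]
    exact pvB_row_iff r s

lemma pvB_iff (l : List (List Int)) :
    pseudoknot_attack_detection_alt l = true ↔
      ∃ t : Nat, ∃ _ : t + 2 < l.length, pvRowHit l[t+1] l[t+2] := by
  unfold pseudoknot_attack_detection_alt
  rw [PySem.List.slice_from_one, PySem.List.slice_from l (by omega : (0:Int) ≤ 2)]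
  rw [show (2 : Int).toNat = 2 from rfl]
  rw [List.any_eq_true]
  constructor
  · rintro ⟨p, hmem, hP⟩
    obtain ⟨t, ht, rfl⟩ := List.mem_iff_getElem.mp hmem
    have htl : t + 2 < l.length := by
      have := List.length_zip (l₁ := l.tail) (l₂ := l.drop 2)
      have h1 := List.length_tail (l := l)
      have h2 := List.length_drop (l := l) (i := 2)
      omega
    have hz : (l.tail.zip (l.drop 2))[t] = (l[t+1], l[t+2]) := by
      rw [List.getElem_zip, List.getElem_tail, List.getElem_drop]
      congr 2
      omega
    rw [hz] at hP
    exact ⟨t, htl, (pvB_inner_shape l[t+1] l[t+2]).mp hP⟩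
  · rintro ⟨t, htl, hhit⟩
    have hb : t < (l.tail.zip (l.drop 2)).length := by
      have := List.length_zip (l₁ := l.tail) (l₂ := l.drop 2)
      have h1 := List.length_tail (l := l)
      have h2 := List.length_drop (l := l) (i := 2)
      omega
    refine ⟨(l.tail.zip (l.drop 2))[t], List.mem_iff_getElem.mpr ⟨t, hb, rfl⟩, ?_⟩
    have hz : (l.tail.zip (l.drop 2))[t] = (l[t+1], l[t+2]) := by
      rw [List.getElem_zip, List.getElem_tail, List.getElem_drop]
      congr 2
      omega
    rw [hz]
    exact (pvB_inner_shape l[t+1] l[t+2]).mpr hhit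

-- ===== VERDICT (by name: the statement is the Claim_ definition above) =====
theorem pseudoknot_attack_detection_spec : Claim_equal_pseudoknot_attack_detection := by
  intro l _
  unfold Spec_pseudoknot_attack_detection
  exact Bool.coe_iff_coe.mp ((pvA_iff l).trans (pvB_iff l).symm)
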